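-- pv_equiv track=rewrite | github.com/Enolaton/study | 프로그래머스/2/70129. 이진 변환 반복하기/이진 변환 반복하기.py | solution
-- ===== SOURCE A (Python) =====
-- def solution(s):
--     answer = []
--     zero_cnt = 0
--     binary_cnt = 0
--
--     while len(s) > 1:
--         new_s = []
--         for check in s:
--             if check == '0':
--                 zero_cnt += 1
--             else:
--                 new_s.append(check)
--         s = bin(len(new_s))[2:]
--         binary_cnt += 1
--     return [binary_cnt,zero_cnt]
-- ===== SOURCE B (Python) =====
-- def solution(s):
--     if len(s) <= 1:
--         return [0, 0]
--     # first round on the raw string (it may contain leading zeros / arbitrary chars)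
--     ones = sum(1 for c in s if c != '0')
--     zero_cnt = len(s) - ones
--     binary_cnt = 1
--     n = ones
--     # from here on the state is just the integer n: bin(n) has n.bit_length()
--     # digits, n.bit_count() of which are ones
--     while n.bit_length() > 1:
--         zero_cnt += n.bit_length() - n.bit_count()
--         binary_cnt += 1
--         n = n.bit_count()
--     return [binary_cnt, zero_cnt]
-- ===== Notes on version B (the rewrite author's own statement) =====
-- stated objective: alternative
-- what changed: After one pass over the raw input string, B keeps the state as a single integer n (the count of ones) and iterates with n.bit_length()/n.bit_count(), instead of A's loop that rebuilds a binary string each round and rescans it character by character.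
import Mathlib
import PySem

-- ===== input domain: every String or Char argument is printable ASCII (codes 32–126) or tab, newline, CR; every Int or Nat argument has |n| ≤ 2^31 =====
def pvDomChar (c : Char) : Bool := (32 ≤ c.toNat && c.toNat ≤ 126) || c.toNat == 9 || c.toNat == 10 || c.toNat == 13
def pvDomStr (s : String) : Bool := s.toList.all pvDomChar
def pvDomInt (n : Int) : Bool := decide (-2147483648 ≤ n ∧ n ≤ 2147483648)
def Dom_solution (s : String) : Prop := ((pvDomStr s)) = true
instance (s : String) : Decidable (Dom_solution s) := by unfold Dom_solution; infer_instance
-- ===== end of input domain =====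

-- B does the first round on the raw string, then keeps only the integer count of ones,
-- walking its bit length / popcount instead of rebuilding and rescanning binary strings
-- ("alternative": an integer-state loop instead of a string-rewriting loop).

-- ===== PORT A =====
-- bin(n)[2:] as a list of characters (bin(0)[2:] = "0")
def pyBinGo (n : Nat) : List Char :=
  if n = 0 then [] else pyBinGo (n / 2) ++ [if n % 2 = 1 then '1' else '0']

def pyBin (n : Nat) : List Char := if n = 0 then ['0'] else pyBinGo n

-- the inner `for check in s` loop: state (zero_cnt, new_s)
def pyScan : List Char → Int → List Char → Int × List Char
  | [], zc, acc => (zc, acc)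
  | c :: rest, zc, acc =>
      if c = '0' then pyScan rest (zc + 1) acc else pyScan rest zc (acc ++ [c])

-- characterisation of the inner loop (cited by loopA's termination proof)
theorem pyScan_eq (l : List Char) (zc : Int) (acc : List Char) :
    pyScan l zc acc
      = (zc + (l.countP (fun c => c == '0') : Int),
         acc ++ l.filter (fun c => !(c == '0'))) := by
  induction l generalizing zc acc with
  | nil => simp [pyScan]
  | cons c rest ih =>
    by_cases h : c = '0'
    · simp [pyScan, h, ih]; ring
    · simp [pyScan, h, ih]

-- size bound on bin's output (cited by loopA's termination proof)
theorem pyBin_mu (n : Nat) :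
    (pyBin n).countP (fun c => !(c == '0')) + (pyBin n).length ≤ n + 1 := by
  have go : ∀ m, 1 ≤ m →
      (pyBinGo m).countP (fun c => !(c == '0')) + (pyBinGo m).length ≤ m + 1 := by
    intro m hm
    induction m using Nat.strong_induction_on with
    | _ m ih =>
      have hm0 : ¬ m = 0 := by omega
      rw [pyBinGo, if_neg hm0]
      rcases Nat.lt_or_ge m 2 with h2 | h2
      · interval_cases m
        simp [pyBinGo]
      · have hrec := ih (m / 2) (by omega) (by omega)
        have hmod : m % 2 = 0 ∨ m % 2 = 1 := by omega
        rcases hmod with h | h <;>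
          · simp [List.countP_append, h]; omega
  by_cases h : n = 0
  · subst h; simp [pyBin]
  · simpa [pyBin, h] using go n (by omega)

def loopA (s : List Char) (zc bc : Int) : List Int :=
  if h : s.length > 1 then
    let r := pyScan s zc []
    loopA (pyBin r.2.length) r.1 (bc + 1)
  else [bc, zc]
termination_by s.countP (fun c => !(c == '0')) + s.length
decreasing_by
  rw [pyScan_eq]
  simp only [List.nil_append]
  have h1 := pyBin_mu ((s.filter (fun c => !(c == '0'))).length)
  have h2 : (s.filter (fun c => !(c == '0'))).length
      = s.countP (fun c => !(c == '0')) := by rw [List.countP_eq_length_filter]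
  omega

def solution (s : String) : List Int := loopA s.toList 0 0

-- ===== PORT B =====
-- int.bit_length, ported by hand (exact: bit_length n = 0 for n = 0, else ⌊log₂ n⌋ + 1)
def bitLen (n : Nat) : Nat := if n = 0 then 0 else bitLen (n / 2) + 1

-- int.bit_count, ported by hand (exact: number of ones in binary)
def popCnt (n : Nat) : Nat := if n = 0 then 0 else popCnt (n / 2) + n % 2

-- cited by loopB's termination proof
theorem popCnt_le (n : Nat) : popCnt n ≤ n := by
  induction n using Nat.strong_induction_on with
  | _ n ih =>
    by_cases h : n = 0
    · simp [popCnt, h]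
    · rw [popCnt, if_neg h]
      have := ih (n / 2) (by omega)
      omega

-- cited by loopB's termination proof
theorem bitLen_gt_one (n : Nat) (hb : bitLen n > 1) : 2 ≤ n := by
  by_contra hn
  interval_cases n <;> simp [bitLen] at hb

def loopB (n : Nat) (bc zc : Int) : List Int :=
  if h : bitLen n > 1 then
    loopB (popCnt n) (bc + 1) (zc + ((bitLen n : Int) - popCnt n))
  else [bc, zc]
termination_by n
decreasing_by
  have h2 := bitLen_gt_one n h
  have h0 : ¬ n = 0 := by omega
  rw [popCnt, if_neg h0]
  have := popCnt_le (n / 2)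
  omega

def solution_alt (s : String) : List Int :=
  if s.toList.length ≤ 1 then [0, 0]
  else
    let ones := s.toList.countP (fun c => !(c == '0'))
    loopB ones 1 ((s.toList.length : Int) - ones)

-- ===== PRECONDITION & SPEC =====
def Spec_solution (s : String) (out : List Int) : Prop := out = solution_alt s
instance (s : String) (out : List Int) : Decidable (Spec_solution s out) := by unfold Spec_solution; infer_instance

-- ===== CLAIM (what is proved, stated in full; the proofs are below) =====
def Claim_equal_solution : Prop := ∀ (s : String), Dom_solution s → Spec_solution s (solution s)

-- ===== LEMMAS AND PROOFS =====

theorem countP_split (l : List Char) :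
    l.countP (fun c => c == '0') + l.countP (fun c => !(c == '0')) = l.length := by
  induction l with
  | nil => rfl
  | cons c rest ih =>
    by_cases h : c = '0' <;> simp [h] <;> omega

theorem pyBinGo_counts (n : Nat) (hn : 1 ≤ n) :
    (pyBinGo n).length = bitLen n ∧
    (pyBinGo n).countP (fun c => !(c == '0')) = popCnt n := by
  induction n using Nat.strong_induction_on with
  | _ n ih =>
    have h0 : ¬ n = 0 := by omega
    rw [pyBinGo, if_neg h0, bitLen, if_neg h0, popCnt, if_neg h0]
    rcases Nat.lt_or_ge n 2 with h2 | h2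
    · interval_cases n
      simp [pyBinGo, bitLen, popCnt]
    · obtain ⟨hl, hc⟩ := ih (n / 2) (by omega) (by omega)
      have hmod : n % 2 = 0 ∨ n % 2 = 1 := by omega
      rcases hmod with h | h <;>
        simp [List.countP_append, h, hl, hc]

theorem bitLen_ge_two (n : Nat) (h : 2 ≤ n) : 2 ≤ bitLen n := by
  have h1 : ∀ m, 1 ≤ m → 1 ≤ bitLen m := by
    intro m hm
    have : ¬ m = 0 := by omega
    rw [bitLen, if_neg this]
    omega
  have h0 : ¬ n = 0 := by omega
  rw [bitLen, if_neg h0]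
  have := h1 (n / 2) (by omega)
  omega

theorem popCnt_lt (n : Nat) (h : 2 ≤ n) : popCnt n < n := by
  have h0 : ¬ n = 0 := by omega
  rw [popCnt, if_neg h0]
  have := popCnt_le (n / 2)
  omega

theorem loop_eq (n : Nat) : ∀ zc bc : Int, loopA (pyBin n) zc bc = loopB n bc zc := by
  induction n using Nat.strong_induction_on with
  | _ n ih =>
    intro zc bc
    rcases Nat.lt_or_ge n 2 with h2 | h2
    · have hb0 : bitLen 0 = 0 := by rw [bitLen, if_pos rfl]
      interval_cases n
      · have hp : pyBin 0 = ['0'] := by rw [pyBin, if_pos rfl]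
        rw [loopA, loopB, hp, hb0]
        norm_num
      · have hb1 : bitLen 1 = 1 := by rw [bitLen, if_neg one_ne_zero]; norm_num [hb0]
        have hp0 : pyBinGo 0 = [] := by rw [pyBinGo, if_pos rfl]
        have hp1 : pyBin 1 = ['1'] := by
          rw [pyBin, if_neg one_ne_zero, pyBinGo, if_neg one_ne_zero]
          norm_num [hp0]
        rw [loopA, loopB, hp1, hb1]
        norm_num
    · have h0 : ¬ n = 0 := by omega
      obtain ⟨hl, hc⟩ := pyBinGo_counts n (by omega)
      have hbin : pyBin n = pyBinGo n := by simp [pyBin, h0]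
      have hlen2 := bitLen_ge_two n h2
      have hsplit := countP_split (pyBinGo n)
      rw [loopA, loopB]
      have hgA : (pyBin n).length > 1 := by rw [hbin, hl]; omega
      have hgB : bitLen n > 1 := by omega
      rw [dif_pos hgA, dif_pos hgB]
      simp only [pyScan_eq, List.nil_append]
      have hfl : (List.filter (fun c => !(c == '0')) (pyBin n)).length = popCnt n := by
        rw [← List.countP_eq_length_filter, hbin, hc]
      rw [hfl, ih (popCnt n) (popCnt_lt n h2)]
      congr 1
      have hzero : ((pyBin n).countP (fun c => c == '0') : Int)
          = (bitLen n : Int) - popCnt n := by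
        rw [hbin]
        omega
      rw [hzero]

theorem solution_eq (s : String) : solution s = solution_alt s := by
  unfold solution solution_alt
  by_cases h : s.toList.length ≤ 1
  · rw [loopA, dif_neg (by omega), if_pos h]
  · have hg : s.toList.length > 1 := by omega
    rw [loopA, dif_pos hg, if_neg h]
    simp only [pyScan_eq, List.nil_append]
    rw [← List.countP_eq_length_filter, loop_eq]
    congr 1
    have := countP_split s.toList
    omega

-- ===== VERDICT (by name: the statement is the Claim_ definition above) =====
theorem solution_spec : Claim_equal_solution := by
  intro s _
  unfold Spec_solution
  exact solution_eq s
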